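-- pv_equiv track=rewrite | github.com/MrHamdulay/csc3-capstone | examples/data/Assignment_4/prtnic017/ndom.py | decimal_to_ndom
-- ===== SOURCE A (Python) =====
-- def decimal_to_ndom(a):  # d
--     ndom = ''
--     x = 216
--     while x >= 6:
--         ndom += str(a // x)
--         a -= (a // x) * x
--         x //= 6
--     while ndom.startswith('0'):
--         ndom = ndom[1:]
--     return ndom + str(a)
-- ===== SOURCE B (Python) =====
-- def decimal_to_ndom(a):
--     d0, n = a % 6, a // 6
--     d1, n = n % 6, n // 6
--     d2, d3 = n % 6, n // 6
--     return (str(d3) + str(d2) + str(d1)).lstrip('0') + str(d0)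
-- ===== Notes on version B (the rewrite author's own statement) =====
-- stated objective: simpler
-- what changed: Replaces A's most-significant-first loop over fixed descending powers of the base (with repeated subtraction of the scaled quotient) by three least-significant-first divmod-by-base steps keeping the final quotient as the top digit, and one lstrip call instead of A's char-by-char stripping loop.
import Mathlib
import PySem

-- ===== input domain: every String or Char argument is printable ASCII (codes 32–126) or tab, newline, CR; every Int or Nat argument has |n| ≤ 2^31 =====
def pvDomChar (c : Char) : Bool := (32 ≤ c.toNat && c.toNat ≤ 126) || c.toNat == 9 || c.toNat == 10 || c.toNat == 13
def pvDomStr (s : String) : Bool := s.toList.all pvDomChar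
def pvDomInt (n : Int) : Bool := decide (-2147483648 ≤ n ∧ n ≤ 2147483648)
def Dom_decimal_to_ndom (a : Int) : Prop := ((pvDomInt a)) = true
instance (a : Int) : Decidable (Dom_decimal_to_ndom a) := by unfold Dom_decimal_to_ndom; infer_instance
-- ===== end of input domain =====

-- B replaces A's most-significant-first loop over the powers 216/36/6 (with repeated
-- subtraction of the scaled quotient) by three least-significant-first divmod-by-6 steps,
-- keeping the last quotient as the top digit, and a single lstrip('0') instead of A's
-- character-by-character stripping loop; objective: simpler.

-- ===== PORT A =====
-- A's `while ndom.startswith('0'): ndom = ndom[1:]` loop, removing one leading '0' per step.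
def pvStripLoopA : List Char → List Char
  | '0' :: rest => pvStripLoopA rest
  | cs => cs

-- A's while loop visits exactly x = 216, 36, 6 (x //= 6 from 216 while x ≥ 6).
def decimal_to_ndom (a : Int) : String :=
  let st := [(216 : Int), 36, 6].foldl
    (fun (s : List Char × Int) x =>
      (s.1 ++ PySem.Int.toChars (PySem.Int.floordiv s.2 x),
       s.2 - PySem.Int.floordiv s.2 x * x)) ([], a)
  String.ofList (pvStripLoopA st.1 ++ PySem.Int.toChars st.2)

-- ===== PORT B =====
-- `.lstrip('0')` ported by hand as dropWhile (· == '0'): exact, it drops exactly the leading '0' characters.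
def decimal_to_ndom_alt (a : Int) : String :=
  let d0 := PySem.Int.mod a 6
  let n1 := PySem.Int.floordiv a 6
  let d1 := PySem.Int.mod n1 6
  let n2 := PySem.Int.floordiv n1 6
  let d2 := PySem.Int.mod n2 6
  let d3 := PySem.Int.floordiv n2 6
  String.ofList (((PySem.Int.toChars d3 ++ PySem.Int.toChars d2 ++ PySem.Int.toChars d1).dropWhile (· == '0'))
    ++ PySem.Int.toChars d0)

-- ===== PRECONDITION & SPEC =====
def Spec_decimal_to_ndom (a : Int) (out : String) : Prop := out = decimal_to_ndom_alt a
instance (a : Int) (out : String) : Decidable (Spec_decimal_to_ndom a out) := by unfold Spec_decimal_to_ndom; infer_instance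

-- ===== CLAIM (what is proved, stated in full; the proofs are below) =====
def Claim_equal_decimal_to_ndom : Prop := ∀ (a : Int), Dom_decimal_to_ndom a → Spec_decimal_to_ndom a (decimal_to_ndom a)

-- ===== LEMMAS AND PROOFS =====

theorem pvStripLoopA_eq_dropWhile (cs : List Char) :
    pvStripLoopA cs = cs.dropWhile (· == '0') := by
  induction cs with
  | nil => rfl
  | cons c rest ih =>
    rw [List.dropWhile_cons]
    by_cases h : c = '0'
    · subst h
      rw [show pvStripLoopA ('0' :: rest) = pvStripLoopA rest from rfl, ih]
      simp
    · have e : pvStripLoopA (c :: rest) = c :: rest := by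
        unfold pvStripLoopA; split
        · simp_all
        · rfl
      rw [e]; simp [h]

theorem pv_digit3 (a : Int) :
    PySem.Int.floordiv a 216
      = PySem.Int.floordiv (PySem.Int.floordiv (PySem.Int.floordiv a 6) 6) 6 := by
  rw [PySem.Int.floordiv_eq_ediv_of_pos (a := a) (by norm_num),
      PySem.Int.floordiv_eq_ediv_of_pos (by norm_num),
      PySem.Int.floordiv_eq_ediv_of_pos (by norm_num),
      PySem.Int.floordiv_eq_ediv_of_pos (by norm_num)]
  omega

theorem pv_digit2 (a : Int) :
    PySem.Int.floordiv (a - PySem.Int.floordiv a 216 * 216) 36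
      = PySem.Int.mod (PySem.Int.floordiv (PySem.Int.floordiv a 6) 6) 6 := by
  rw [PySem.Int.floordiv_eq_ediv_of_pos (a := a) (b := 216) (by norm_num),
      PySem.Int.floordiv_eq_ediv_of_pos (by norm_num),
      PySem.Int.floordiv_eq_ediv_of_pos (a := a) (b := 6) (by norm_num),
      PySem.Int.floordiv_eq_ediv_of_pos (by norm_num),
      PySem.Int.mod_eq_emod_of_pos (by norm_num)]
  omega

theorem pv_digit1 (a : Int) :
    PySem.Int.floordiv
        (a - PySem.Int.floordiv a 216 * 216
           - PySem.Int.floordiv (a - PySem.Int.floordiv a 216 * 216) 36 * 36) 6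
      = PySem.Int.mod (PySem.Int.floordiv a 6) 6 := by
  rw [PySem.Int.floordiv_eq_ediv_of_pos (a := a) (b := 216) (by norm_num),
      PySem.Int.floordiv_eq_ediv_of_pos (b := 36) (by norm_num),
      PySem.Int.floordiv_eq_ediv_of_pos (b := 6) (by norm_num),
      PySem.Int.floordiv_eq_ediv_of_pos (a := a) (b := 6) (by norm_num),
      PySem.Int.mod_eq_emod_of_pos (by norm_num)]
  omega

theorem pv_digit0 (a : Int) :
    a - PySem.Int.floordiv a 216 * 216
      - PySem.Int.floordiv (a - PySem.Int.floordiv a 216 * 216) 36 * 36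
      - PySem.Int.floordiv
          (a - PySem.Int.floordiv a 216 * 216
             - PySem.Int.floordiv (a - PySem.Int.floordiv a 216 * 216) 36 * 36) 6 * 6
      = PySem.Int.mod a 6 := by
  rw [PySem.Int.floordiv_eq_ediv_of_pos (a := a) (b := 216) (by norm_num),
      PySem.Int.floordiv_eq_ediv_of_pos (b := 36) (by norm_num),
      PySem.Int.floordiv_eq_ediv_of_pos (b := 6) (by norm_num),
      PySem.Int.mod_eq_emod_of_pos (by norm_num)]
  omega

-- ===== VERDICT (by name: the statement is the Claim_ definition above) =====
theorem decimal_to_ndom_spec : Claim_equal_decimal_to_ndom := by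
  intro a _
  unfold Spec_decimal_to_ndom decimal_to_ndom decimal_to_ndom_alt
  simp only [List.foldl]
  rw [pvStripLoopA_eq_dropWhile, pv_digit0 a, pv_digit1 a, pv_digit2 a, pv_digit3 a]
  simp
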